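-- pv_equiv track=rewrite | github.com/herolava259/Coding-Interview-Practice | HackerRankWithAlgorithm/DynamicProgramming/PlayWithWords.py | firstIdxOfCharacterAppear
-- ===== SOURCE A (Python) =====
-- def firstIdxOfCharacterAppear(s):
--     n = len(s)
--     firstAppearArr = [[-1 for j in range(n)] for i in range(26)]
--
--     last_update = [-1 for i in range(26)]
--
--     a_idx = ord('a')
--
--     for idx, c in enumerate(s):
--         i = ord(c) - a_idx
--         begin = last_update[i] + 1
--         for j in range(begin, idx+1):
--             firstAppearArr[i][j] = idx
--         last_update[i] = idx
--
--     return firstAppearArr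
-- ===== SOURCE B (Python) =====
-- def firstIdxOfCharacterAppear(s):
--     n = len(s)
--     next_occ = [-1] * 26
--     cols = []
--     for j in range(n - 1, -1, -1):
--         next_occ[ord(s[j]) - ord('a')] = j
--         cols.append(next_occ.copy())
--     cols.reverse()
--     return [[cols[j][i] for j in range(n)] for i in range(26)]
-- ===== Notes on version B (the rewrite author's own statement) =====
-- stated objective: alternative
-- what changed: Replaces A's forward pass with per-letter disjoint range-fills into a pre-built 26xn table by a single backward sweep that maintains a 26-vector of next occurrences and snapshots one column per position, then assembles the rows.
import Mathlib
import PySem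

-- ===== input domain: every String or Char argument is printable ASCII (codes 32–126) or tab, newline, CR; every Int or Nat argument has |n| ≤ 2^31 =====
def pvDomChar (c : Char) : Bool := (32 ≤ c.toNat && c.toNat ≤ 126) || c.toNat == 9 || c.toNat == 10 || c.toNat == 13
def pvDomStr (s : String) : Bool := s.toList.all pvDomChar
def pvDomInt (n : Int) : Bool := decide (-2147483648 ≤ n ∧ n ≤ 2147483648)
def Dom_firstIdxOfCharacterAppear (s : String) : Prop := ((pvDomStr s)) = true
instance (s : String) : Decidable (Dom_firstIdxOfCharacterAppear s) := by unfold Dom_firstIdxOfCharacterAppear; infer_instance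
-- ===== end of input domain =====

-- B assembles the table from a single backward sweep maintaining a next-occurrence vector
-- (one column snapshot per position), instead of A's forward per-letter range fills: alternative algorithm, same cost.


-- Python list index resolution for the length-26 lists both programs index with ord(c)-ord('a'):
-- exact for -26 ≤ ord(c)-97 < 26, which Pre_ guarantees (outside that Python raises IndexError).
def pvRow (c : Char) : Nat := (if ((c.toNat : Int) - 97) < 0 then (c.toNat : Int) - 97 + 26 else (c.toNat : Int) - 97).toNat

-- ===== PORT A =====
-- inner loop: for j in range(begin, idx+1): firstAppearArr[i][j] = idx   (j ≥ 0 here, so .toNat is exact)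
def pvFillA (row : List Int) (b e v : Int) : List Int :=
  (PySem.List.pyRange b e 1).foldl (fun r j => PySem.List.pySetD r j v) row

def pvStepA (st : List (List Int) × List Int) (p : Int × Char) : List (List Int) × List Int :=
  let i := pvRow p.2
  let begin_ : Int := st.2.getD i (-1) + 1          -- last_update[i] + 1 (index resolved by pvRow; in range under Pre_)
  let arr := st.1.set i (pvFillA (st.1.getD i []) begin_ (p.1 + 1) p.1)
  (arr, st.2.set i p.1)

def firstIdxOfCharacterAppear (s : String) : List (List Int) :=
  let cs := s.toList
  let n := cs.length
  let arr0 : List (List Int) := (List.range 26).map (fun _ => (List.range n).map (fun _ => (-1 : Int)))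
  let last0 : List Int := (List.range 26).map (fun _ => (-1 : Int))
  ((PySem.List.enumerate cs 0).foldl pvStepA (arr0, last0)).1

-- ===== PORT B =====
def pvStepB (cs : List Char) (st : List Int × List (List Int)) (j : Int) : List Int × List (List Int) :=
  let nxt := st.1.set (pvRow (cs.getD j.toNat ' ')) j   -- next_occ[ord(s[j])-97] = j (j ≥ 0 from the range; in range under Pre_)
  (nxt, st.2 ++ [nxt])                                   -- cols.append(next_occ.copy())

def firstIdxOfCharacterAppear_alt (s : String) : List (List Int) :=
  let cs := s.toList
  let n := cs.length
  let st := (PySem.List.pyRange ((n : Int) - 1) (-1) (-1)).foldl (pvStepB cs)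
              (List.replicate 26 (-1 : Int), ([] : List (List Int)))
  let cols := st.2.reverse                               -- cols.reverse()
  (List.range 26).map (fun i => (List.range n).map (fun j => (cols.getD j []).getD i (-1)))

-- ===== PRECONDITION & SPEC =====
-- Pre_ excludes exactly the inputs on which A raises IndexError: a character with code outside
-- [71,122] makes ord(c)-97 fall outside [-26,26) and the row lookup raises (B raises there too).
def Pre_firstIdxOfCharacterAppear (s : String) : Prop :=
  (s.toList.all (fun c => 71 ≤ c.toNat && c.toNat ≤ 122)) = true
instance (s : String) : Decidable (Pre_firstIdxOfCharacterAppear s) := by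
  unfold Pre_firstIdxOfCharacterAppear; infer_instance

def pvWitness_firstIdxOfCharacterAppear : String := "abca"

def Spec_firstIdxOfCharacterAppear (s : String) (out : List (List Int)) : Prop := out = firstIdxOfCharacterAppear_alt s
instance (s : String) (out : List (List Int)) : Decidable (Spec_firstIdxOfCharacterAppear s out) := by unfold Spec_firstIdxOfCharacterAppear; infer_instance

-- ===== CLAIM (what is proved, stated in full; the proofs are below) =====
def Claim_equal_firstIdxOfCharacterAppear : Prop := ∀ (s : String), Dom_firstIdxOfCharacterAppear s → Pre_firstIdxOfCharacterAppear s → Spec_firstIdxOfCharacterAppear s (firstIdxOfCharacterAppear s)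

-- ===== LEMMAS AND PROOFS =====

-- row of character k of cs
def pvE (cs : List Char) (k : Nat) : Nat := pvRow (cs.getD k ' ')

-- first index k with j ≤ k < m and pvE cs k = i, else -1
def pvG (cs : List Char) (m i j : Nat) : Int :=
  if h : j < m ∧ j < cs.length then
    (if pvE cs j = i then (j : Int) else pvG cs m i (j + 1))
  else -1
termination_by cs.length - j
decreasing_by omega

-- last index k < m with pvE cs k = i, else -1
def pvL (cs : List Char) (i : Nat) : Nat → Int
  | 0 => -1
  | (m+1) => if pvE cs m = i then (m : Int) else pvL cs i m

def pvTable (cs : List Char) (m : Nat) : List (List Int) :=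
  (List.range 26).map (fun i => (List.range cs.length).map (fun j => pvG cs m i j))

def pvLast (cs : List Char) (m : Nat) : List Int :=
  (List.range 26).map (fun i => pvL cs i m)
-- abbreviation for the character-range precondition on the list side
def pvP (cs : List Char) : Prop := ∀ c ∈ cs, 71 ≤ c.toNat ∧ c.toNat ≤ 122

lemma pvE_lt {cs : List Char} (hP : pvP cs) {k : Nat} (hk : k < cs.length) : pvE cs k < 26 := by
  have hm : cs.getD k ' ' ∈ cs := by
    rw [List.getD_eq_getElem cs ' ' hk]; exact List.getElem_mem hk
  have := hP _ hm
  unfold pvE pvRow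
  split <;> omega

lemma pvG_ge {cs : List Char} {m i j : Nat} (h : m ≤ j) : pvG cs m i j = -1 := by
  rw [pvG]; simp; omega

lemma pvG_succ_of_ne {cs : List Char} {m i : Nat} (hne : pvE cs m ≠ i) :
    ∀ j, pvG cs (m+1) i j = pvG cs m i j := by
  intro j
  induction hd : cs.length - j using Nat.strong_induction_on generalizing j with
  | _ d IH =>
    by_cases hj : j < cs.length
    · by_cases h1 : j < m
      · rw [pvG]; conv_rhs => rw [pvG]
        rw [dif_pos ⟨by omega, hj⟩, dif_pos ⟨h1, hj⟩]
        by_cases h2 : pvE cs j = i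
        · rw [if_pos h2, if_pos h2]
        · rw [if_neg h2, if_neg h2]
          exact IH (cs.length - (j+1)) (by omega) (j+1) rfl
      · by_cases h0 : j = m
        · rw [h0, pvG, dif_pos ⟨Nat.lt_succ_self m, h0 ▸ hj⟩, if_neg hne,
            pvG_ge (le_refl (m+1)), pvG_ge (le_refl m)]
        · rw [pvG_ge (by omega), pvG_ge (by omega)]
    · rw [pvG]; conv_rhs => rw [pvG]
      rw [dif_neg (by omega), dif_neg (by omega)]

lemma pvG_succ_top {cs : List Char} {m i : Nat} (hm : m < cs.length) (hi : pvE cs m = i) :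
    ∀ j, (∀ k, j ≤ k → k < m → pvE cs k ≠ i) → j ≤ m → pvG cs (m+1) i j = (m : Int) := by
  intro j
  induction hd : cs.length - j using Nat.strong_induction_on generalizing j with
  | _ d IH =>
    intro hno hj
    rw [pvG, dif_pos ⟨by omega, by omega⟩]
    by_cases h0 : j = m
    · subst h0; rw [if_pos hi]
    · rw [if_neg (hno j le_rfl (by omega))]
      exact IH (cs.length - (j+1)) (by omega) (j+1) rfl
        (fun k hk1 hk2 => hno k (by omega) hk2) (by omega)

lemma pvG_succ_of_occ {cs : List Char} {m i : Nat} :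
    ∀ j, (∃ k, j ≤ k ∧ k < m ∧ pvE cs k = i) → m ≤ cs.length →
    pvG cs (m+1) i j = pvG cs m i j := by
  intro j
  induction hd : cs.length - j using Nat.strong_induction_on generalizing j with
  | _ d IH =>
    intro hocc hml
    obtain ⟨k, hk1, hk2, hk3⟩ := hocc
    have hjm : j < m := by omega
    have hjl : j < cs.length := by omega
    rw [pvG]; conv_rhs => rw [pvG]
    rw [dif_pos ⟨by omega, hjl⟩, dif_pos ⟨hjm, hjl⟩]
    by_cases h2 : pvE cs j = i
    · rw [if_pos h2, if_pos h2]
    · rw [if_neg h2, if_neg h2]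
      have hkj : j ≠ k := fun h => h2 (h ▸ hk3)
      exact IH (cs.length - (j+1)) (by omega) (j+1) rfl ⟨k, by omega, hk2, hk3⟩ hml

lemma pvL_ge {cs : List Char} {i : Nat} : ∀ m, -1 ≤ pvL cs i m := by
  intro m; induction m with
  | zero => simp [pvL]
  | succ m IH => rw [pvL]; split <;> omega

lemma pvL_le_iff {cs : List Char} {i j : Nat} :
    ∀ m, ((j : Int) ≤ pvL cs i m ↔ ∃ k, j ≤ k ∧ k < m ∧ pvE cs k = i) := by
  intro m; induction m with
  | zero =>
    simp only [pvL]
    constructor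
    · intro h; omega
    · rintro ⟨k, _, hk, _⟩; omega
  | succ m IH =>
    rw [pvL]
    by_cases h : pvE cs m = i
    · rw [if_pos h]
      constructor
      · intro hj; exact ⟨m, by omega, by omega, h⟩
      · rintro ⟨k, hk1, hk2, _⟩; omega
    · rw [if_neg h, IH]
      constructor
      · rintro ⟨k, hk1, hk2, hk3⟩; exact ⟨k, hk1, by omega, hk3⟩
      · rintro ⟨k, hk1, hk2, hk3⟩
        have : k ≠ m := fun he => h (he ▸ hk3)
        exact ⟨k, hk1, by omega, hk3⟩

lemma pvFill_aux_length (v : Int) : ∀ (l : List Int) (row : List Int),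
    (l.foldl (fun r j => PySem.List.pySetD r j v) row).length = row.length := by
  intro l
  induction l with
  | nil => intro row; rfl
  | cons x xs IH =>
    intro row
    simp only [List.foldl_cons, IH, PySem.List.length_pySetD]

lemma pvFillA_length (row : List Int) (b e v : Int) : (pvFillA row b e v).length = row.length :=
  pvFill_aux_length v _ row

lemma pvFillA_getD (v : Int) : ∀ (n : Nat) (b e : Int) (row : List Int) (t : Nat) (d : Int),
    0 ≤ b → (e - b).toNat = n → t < row.length →
    (pvFillA row b e v).getD t d = if b ≤ (t : Int) ∧ (t : Int) < e then v else row.getD t d := by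
  intro n
  induction n with
  | zero =>
    intro b e row t d hb hn ht
    have hbe : e ≤ b := by omega
    unfold pvFillA
    rw [PySem.List.pyRange_one_eq_nil hbe]
    simp only [List.foldl_nil]
    rw [if_neg (by omega)]
  | succ n IH =>
    intro b e row t d hb hn ht
    have hbe : b < e := by omega
    unfold pvFillA
    rw [PySem.List.pyRange_one_cons hbe]
    simp only [List.foldl_cons]
    rw [PySem.List.pySetD_of_nonneg row v hb]
    have := IH (b+1) e (row.set b.toNat v) t d (by omega) (by omega)
      (by simpa using ht)
    unfold pvFillA at this
    rw [this]
    by_cases h1 : b + 1 ≤ (t : Int) ∧ (t : Int) < e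
    · rw [if_pos h1, if_pos (by omega)]
    · rw [if_neg h1]
      by_cases h2 : b ≤ (t : Int) ∧ (t : Int) < e
      · have htb : t = b.toNat := by omega
        have hbl : b.toNat < row.length := by omega
        rw [if_pos h2, htb, List.getD_eq_getElem _ _ (by simpa using hbl)]
        simp
      · rw [if_neg h2]
        rw [List.getD_eq_getElem _ _ (by simpa using ht), List.getD_eq_getElem _ _ ht,
          List.getElem_set_ne (by omega)]
lemma pvLast_getD {cs : List Char} {m r : Nat} (hr : r < 26) :
    (pvLast cs m).getD r (-1) = pvL cs r m := by
  unfold pvLast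
  rw [List.getD_eq_getElem _ _ (by simpa using hr)]
  simp

lemma pvTable_getD {cs : List Char} {m r : Nat} (hr : r < 26) :
    (pvTable cs m).getD r [] = (List.range cs.length).map (fun j => pvG cs m r j) := by
  unfold pvTable
  rw [List.getD_eq_getElem _ _ (by simpa using hr)]
  simp

lemma pvStepA_eq {cs : List Char} (hP : pvP cs) {m : Nat} (hm : m < cs.length) :
    pvStepA (pvTable cs m, pvLast cs m) ((m : Int), cs[m]) = (pvTable cs (m+1), pvLast cs (m+1)) := by
  have hE : pvRow cs[m] = pvE cs m := by
    unfold pvE; rw [List.getD_eq_getElem cs ' ' hm]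
  have h26 : pvE cs m < 26 := pvE_lt hP hm
  have hLge : -1 ≤ pvL cs (pvE cs m) m := pvL_ge m
  unfold pvStepA
  simp only [hE, pvLast_getD h26, pvTable_getD h26]
  rw [Prod.mk.injEq]
  constructor
  · -- table component
    apply List.ext_getElem
    · simp [pvTable]
    · intro r h1 h2
      have hr : r < 26 := by simpa [pvTable] using h2
      rw [List.getElem_set]
      by_cases hre : pvE cs m = r
      · rw [if_pos hre]
        subst hre
        apply List.ext_getElem
        · simp [pvTable, pvFillA_length]
        · intro t ht1 ht2
          have htn : t < cs.length := by simpa [pvTable] using ht2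
          have hRlen : t < (pvFillA ((List.range cs.length).map (fun j => pvG cs m (pvE cs m) j))
              (pvL cs (pvE cs m) m + 1) ((m:Int) + 1) (m:Int)).length := by
            rw [pvFillA_length]; simpa using htn
          rw [← List.getD_eq_getElem _ (0:Int) hRlen,
            pvFillA_getD (m:Int) ((((m:Int)+1) - (pvL cs (pvE cs m) m + 1)).toNat) _ _ _ t 0
              (by omega) rfl (by simpa using htn)]
          simp only [pvTable, List.getElem_map, List.getElem_range]
          rw [List.getD_eq_getElem _ _ (by simpa using htn), List.getElem_map, List.getElem_range]
          by_cases hcond : pvL cs (pvE cs m) m + 1 ≤ (t:Int) ∧ (t:Int) < (m:Int) + 1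
          · rw [if_pos hcond]
            have hno : ∀ k, t ≤ k → k < m → pvE cs k ≠ pvE cs m := by
              intro k hk1 hk2 hk3
              have : (t:Int) ≤ pvL cs (pvE cs m) m := (pvL_le_iff m).2 ⟨k, hk1, hk2, hk3⟩
              omega
            rw [pvG_succ_top hm rfl t hno (by omega)]
          · rw [if_neg hcond]
            by_cases hocc : (t:Int) ≤ pvL cs (pvE cs m) m
            · rw [pvG_succ_of_occ t ((pvL_le_iff m).1 hocc) (by omega)]
            · rw [pvG_ge (by omega), pvG_ge (by omega)]
      · rw [if_neg hre]
        simp only [pvTable, List.getElem_map, List.getElem_range]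
        exact List.map_congr_left (fun j _ => (pvG_succ_of_ne hre j).symm)
  · -- last component
    apply List.ext_getElem
    · simp [pvLast]
    · intro r h1 h2
      have hr : r < 26 := by simpa [pvLast] using h2
      rw [List.getElem_set]
      simp only [pvLast, List.getElem_map, List.getElem_range]
      rw [pvL]

lemma pvTable_zero (cs : List Char) :
    pvTable cs 0 = (List.range 26).map (fun _ => (List.range cs.length).map (fun _ => (-1 : Int))) := by
  unfold pvTable
  refine List.map_congr_left (fun i _ => ?_)
  refine List.map_congr_left (fun j _ => ?_)
  exact pvG_ge (Nat.zero_le j)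

lemma pvLast_zero (cs : List Char) :
    pvLast cs 0 = (List.range 26).map (fun _ => (-1 : Int)) := by
  unfold pvLast
  exact List.map_congr_left (fun i _ => rfl)

lemma pvA_loop {cs : List Char} (hP : pvP cs) :
    ∀ m, m ≤ cs.length →
      ((PySem.List.enumerate cs 0).take m).foldl pvStepA (pvTable cs 0, pvLast cs 0)
        = (pvTable cs m, pvLast cs m) := by
  intro m
  induction m with
  | zero => intro _; simp
  | succ m IH =>
    intro hm
    have hml : m < cs.length := by omega
    have hget : (PySem.List.enumerate cs 0)[m]? = some ((m : Int), cs[m]) := by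
      rw [PySem.List.getElem?_enumerate, List.getElem?_eq_getElem hml]
      simp
    rw [List.take_add_one, hget, List.foldl_append, IH (by omega)]
    simpa using pvStepA_eq hP hml

lemma pvA_eq {s : String} (hP : pvP s.toList) :
    firstIdxOfCharacterAppear s = pvTable s.toList s.toList.length := by
  unfold firstIdxOfCharacterAppear
  dsimp only
  have hlen : (PySem.List.enumerate s.toList 0).length = s.toList.length := by
    simp [PySem.List.length_enumerate]
  have := pvA_loop hP s.toList.length (le_refl _)
  rw [List.take_of_length_le (by rw [hlen])] at this
  rw [← pvTable_zero, ← pvLast_zero, this]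
def pvVec (cs : List Char) (t : Nat) : List Int :=
  (List.range 26).map (fun i => pvG cs cs.length i t)

lemma pvStepB_eq {cs : List Char} (hP : pvP cs) {t : Nat} (ht : t < cs.length) (cols : List (List Int)) :
    pvStepB cs (pvVec cs (t+1), cols) (t : Int) = (pvVec cs t, cols ++ [pvVec cs t]) := by
  have hE : pvRow (cs.getD ((t : Int)).toNat ' ') = pvE cs t := by
    simp [pvE]
  have h26 : pvE cs t < 26 := pvE_lt hP ht
  unfold pvStepB
  dsimp only
  rw [hE]
  suffices hv : (pvVec cs (t+1)).set (pvE cs t) (t : Int) = pvVec cs t by rw [hv]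
  apply List.ext_getElem
  · simp [pvVec]
  · intro r h1 h2
    have hr : r < 26 := by simpa [pvVec] using h2
    rw [List.getElem_set]
    simp only [pvVec, List.getElem_map, List.getElem_range]
    conv_rhs => rw [pvG]
    rw [dif_pos ⟨ht, ht⟩]

lemma pvB_loop {cs : List Char} (hP : pvP cs) :
    ∀ t, t ≤ cs.length → ∀ cols,
      (PySem.List.pyRange ((t : Int) - 1) (-1) (-1)).foldl (pvStepB cs) (pvVec cs t, cols)
        = (pvVec cs 0, cols ++ ((List.range t).map (fun j => pvVec cs j)).reverse) := by
  intro t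
  induction t with
  | zero =>
    intro _ cols
    rw [show ((0:Nat):Int) - 1 = -1 by norm_num, PySem.List.pyRange_neg_one_eq_nil le_rfl]
    simp
  | succ t IH =>
    intro ht cols
    rw [show (((t+1:Nat)):Int) - 1 = (t:Int) by push_cast; ring,
      PySem.List.pyRange_neg_one_cons (show (-1:Int) < (t:Int) by omega)]
    rw [List.foldl_cons, pvStepB_eq hP (by omega) cols]
    have := IH (by omega) (cols ++ [pvVec cs t])
    rw [show (t:Int) - 1 = ((t:Nat):Int) - 1 by norm_num] at this
    rw [this, List.range_succ, List.map_append, List.reverse_append]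
    simp
lemma pvB_eq {s : String} (hP : pvP s.toList) :
    firstIdxOfCharacterAppear_alt s = pvTable s.toList s.toList.length := by
  unfold firstIdxOfCharacterAppear_alt
  dsimp only
  have hrepl : List.replicate 26 (-1 : Int) = pvVec s.toList s.toList.length := by
    apply List.ext_getElem
    · simp [pvVec]
    · intro r h1 h2
      simp [pvVec, pvG_ge le_rfl]
  rw [hrepl, pvB_loop hP s.toList.length le_rfl []]
  dsimp only
  rw [List.nil_append, List.reverse_reverse]
  unfold pvTable
  refine List.map_congr_left (fun i hi => ?_)
  have hi26 : i < 26 := List.mem_range.1 hi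
  refine List.map_congr_left (fun j hj => ?_)
  have hjn : j < s.toList.length := List.mem_range.1 hj
  have hjn' : j < s.length := by simpa using hjn
  simp [List.getD_eq_getElem?_getD, pvVec, hjn', hi26]

-- ===== VERDICT (by name: the statement is the Claim_ definition above) =====
theorem firstIdxOfCharacterAppear_spec : Claim_equal_firstIdxOfCharacterAppear := by
  intro s _ hPre
  unfold Spec_firstIdxOfCharacterAppear
  have hP : pvP s.toList := by
    intro c hc
    have := List.all_eq_true.1 hPre c hc
    simpa using this
  rw [pvA_eq hP, pvB_eq hP]
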